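-- pv_equiv track=rewrite | github.com/aromaltl/mappy | utils.py | filter_videos
-- ===== SOURCE A (Python) =====
-- def filter_videos(videos,include,exclude):
--     new = []
--     for ii in videos:
--         cont =False
--         for ex in exclude:
--             if ex in ii:
--                 cont=True
--                 break
--         if cont:
--             continue
--         for inc in include:
--             if inc in ii:
--                 new.append(ii)
--                 break
--     return new
-- ===== SOURCE B (Python) =====
-- def _mark(patterns, pairs):
--     hit = set()
--     remaining = pairs
--     for p in patterns:
--         still = []
--         for iv in remaining:
--             if p in iv[1]:
--                 hit.add(iv[0])
--             else:
--                 still.append(iv)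
--         remaining = still
--     return hit
--
--
-- def filter_videos(videos, include, exclude):
--     pairs = list(enumerate(videos))
--     excluded = _mark(exclude, pairs)
--     included = _mark(include, [iv for iv in pairs if iv[0] not in excluded])
--     return [v for i, v in pairs if i in included]
-- ===== Notes on version B (the rewrite author's own statement) =====
-- stated objective: alternative
-- what changed: B inverts the traversal: instead of A's per-video loop that break-scans the exclude then include patterns with a flag and continue, B runs one pattern-major pass per pattern list over a shrinking worklist of still-unmatched (index, video) pairs, collecting hit indices into sets (exclude first, include only over non-excluded pairs), and finally emits the videos whose index was included.
import Mathlib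
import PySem

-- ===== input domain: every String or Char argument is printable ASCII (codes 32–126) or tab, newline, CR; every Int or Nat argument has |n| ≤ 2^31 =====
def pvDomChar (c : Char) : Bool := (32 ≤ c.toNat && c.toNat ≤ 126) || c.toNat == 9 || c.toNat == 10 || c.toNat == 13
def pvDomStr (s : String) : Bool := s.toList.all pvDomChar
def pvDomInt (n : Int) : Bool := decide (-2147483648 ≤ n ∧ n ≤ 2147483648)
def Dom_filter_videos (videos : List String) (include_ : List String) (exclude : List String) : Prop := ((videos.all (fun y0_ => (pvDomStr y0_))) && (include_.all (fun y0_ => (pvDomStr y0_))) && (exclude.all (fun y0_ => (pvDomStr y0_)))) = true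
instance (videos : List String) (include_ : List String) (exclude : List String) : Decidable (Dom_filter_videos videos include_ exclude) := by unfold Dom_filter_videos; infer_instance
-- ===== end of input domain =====

-- B replaces A's per-video loop (with break/continue flags) by two pattern-major
-- marking passes that collect hit indices into sets (skipping indices already hit),
-- then emits the videos whose index is included and not excluded.

-- ===== PORT A =====
-- A: for each video, break-scan exclude (flag 'cont'), continue if hit, then
-- break-scan include appending on the first hit; a for-with-break over patterns is List.any.
def filter_videos (videos : List String) (include_ : List String) (exclude : List String) : List String :=
  videos.foldl
    (fun new ii =>
      if exclude.any (fun ex => PySem.Str.isIn ex ii) then new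
      else if include_.any (fun inc => PySem.Str.isIn inc ii) then new ++ [ii]
      else new)
    []

-- ===== PORT B =====
-- _mark: one pass per pattern over the still-unmatched (index, video) pairs,
-- moving matched indices into the hit set and keeping the rest for the next pattern.
def pvMark (patterns : List String) (pairs : List (Int × String)) : PySem.Set Int :=
  (patterns.foldl
    (fun st p =>
      st.2.foldl
        (fun st' iv =>
          if PySem.Str.isIn p iv.2 then (PySem.Set.add st'.1 iv.1, st'.2)
          else (st'.1, st'.2 ++ [iv]))
        (st.1, ([] : List (Int × String))))
    (PySem.Set.empty, pairs)).1

def filter_videos_alt (videos : List String) (include_ : List String) (exclude : List String) : List String :=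
  let pairs := PySem.List.enumerate videos 0
  let excluded := pvMark exclude pairs
  let included := pvMark include_
    (pairs.filter (fun iv => !(PySem.Set.contains excluded iv.1)))
  (pairs.filter (fun iv => PySem.Set.contains included iv.1)).map (fun iv => iv.2)

-- ===== PRECONDITION & SPEC =====
def Spec_filter_videos (videos : List String) (include_ : List String) (exclude : List String) (out : List String) : Prop := out = filter_videos_alt videos include_ exclude
instance (videos : List String) (include_ : List String) (exclude : List String) (out : List String) : Decidable (Spec_filter_videos videos include_ exclude out) := by unfold Spec_filter_videos; infer_instance

-- ===== CLAIM (what is proved, stated in full; the proofs are below) =====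
def Claim_equal_filter_videos : Prop := ∀ (videos : List String) (include_ : List String) (exclude : List String), Dom_filter_videos videos include_ exclude → Spec_filter_videos videos include_ exclude (filter_videos videos include_ exclude)

-- ===== LEMMAS AND PROOFS =====

-- A equals a plain filter
theorem filterA_eq_filter (videos include_ exclude : List String) :
    filter_videos videos include_ exclude =
      videos.filter (fun ii =>
        !(exclude.any (fun ex => PySem.Str.isIn ex ii)) &&
          include_.any (fun inc => PySem.Str.isIn inc ii)) := by
  unfold filter_videos
  have hfun : (fun (new : List String) ii =>
        if exclude.any (fun ex => PySem.Str.isIn ex ii) then new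
        else if include_.any (fun inc => PySem.Str.isIn inc ii) then new ++ [ii]
        else new) =
      (fun new ii =>
        if (!(exclude.any (fun ex => PySem.Str.isIn ex ii)) &&
            include_.any (fun inc => PySem.Str.isIn inc ii)) then new ++ [ii] else new) := by
    funext new ii
    cases he : exclude.any (fun ex => PySem.Str.isIn ex ii) <;>
      cases hi : include_.any (fun inc => PySem.Str.isIn inc ii) <;>
        simp
  rw [hfun, PySem.List.foldl_append_if_eq_filter, List.nil_append]

-- the inner pass: second component = the non-matching pairs appended in order
theorem inner_snd (p : String) :
    ∀ (rem : List (Int × String)) (hit : PySem.Set Int) (acc : List (Int × String)),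
      (rem.foldl
          (fun st' iv =>
            if PySem.Str.isIn p iv.2 then (PySem.Set.add st'.1 iv.1, st'.2)
            else (st'.1, st'.2 ++ [iv]))
          (hit, acc)).2 =
        acc ++ rem.filter (fun iv => !(PySem.Str.isIn p iv.2)) := by
  intro rem
  induction rem with
  | nil => simp
  | cons iv tl ih =>
      intro hit acc
      simp only [List.foldl_cons, List.filter_cons]
      cases h : PySem.Str.isIn p iv.2 with
      | true => simp only [if_true, Bool.not_true, Bool.false_eq_true, if_false]; rw [ih]
      | false =>
          simp only [Bool.false_eq_true, if_false, Bool.not_false, if_true]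
          rw [ih]
          simp

-- the inner pass: membership in the hit set
theorem inner_fst_mem (p : String) :
    ∀ (rem : List (Int × String)) (hit : PySem.Set Int) (acc : List (Int × String)) (x : Int),
      x ∈ (rem.foldl
          (fun st' iv =>
            if PySem.Str.isIn p iv.2 then (PySem.Set.add st'.1 iv.1, st'.2)
            else (st'.1, st'.2 ++ [iv]))
          (hit, acc)).1 ↔
        x ∈ hit ∨ ∃ iv ∈ rem, PySem.Str.isIn p iv.2 = true ∧ x = iv.1 := by
  intro rem
  induction rem with
  | nil => simp
  | cons iv tl ih =>
      intro hit acc x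
      simp only [List.foldl_cons]
      cases h : PySem.Str.isIn p iv.2 with
      | true =>
          simp only [if_true]
          rw [ih]
          simp only [PySem.Set.mem_add, List.mem_cons]
          constructor
          · rintro ((hx | rfl) | ⟨jv, hjv, hm, rfl⟩)
            · exact Or.inl hx
            · exact Or.inr ⟨iv, Or.inl rfl, h, rfl⟩
            · exact Or.inr ⟨jv, Or.inr hjv, hm, rfl⟩
          · rintro (hx | ⟨jv, (rfl | hjv), hm, rfl⟩)
            · exact Or.inl (Or.inl hx)
            · exact Or.inl (Or.inr rfl)
            · exact Or.inr ⟨jv, hjv, hm, rfl⟩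
      | false =>
          simp only [Bool.false_eq_true, if_false]
          rw [ih]
          simp only [List.mem_cons]
          constructor
          · rintro (hx | ⟨jv, hjv, hm, rfl⟩)
            · exact Or.inl hx
            · exact Or.inr ⟨jv, Or.inr hjv, hm, rfl⟩
          · rintro (hx | ⟨jv, (rfl | hjv), hm, rfl⟩)
            · exact Or.inl hx
            · exact absurd hm (by simpa using h)
            · exact Or.inr ⟨jv, hjv, hm, rfl⟩

-- the outer fold: membership in the final hit set, any starting state
theorem mark_mem_aux :
    ∀ (patterns : List String) (st : PySem.Set Int × List (Int × String)) (x : Int),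
      x ∈ (patterns.foldl
          (fun st p =>
            st.2.foldl
              (fun st' iv =>
                if PySem.Str.isIn p iv.2 then (PySem.Set.add st'.1 iv.1, st'.2)
                else (st'.1, st'.2 ++ [iv]))
              (st.1, ([] : List (Int × String))))
          st).1 ↔
        x ∈ st.1 ∨ ∃ iv ∈ st.2, (∃ p ∈ patterns, PySem.Str.isIn p iv.2 = true) ∧ x = iv.1 := by
  intro patterns
  induction patterns with
  | nil => simp
  | cons p tl ih =>
      intro st x
      simp only [List.foldl_cons]
      rw [ih]
      constructor
      · rintro (hx | ⟨iv, hiv, ⟨q, hq, hm⟩, rfl⟩)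
        · rw [inner_fst_mem] at hx
          rcases hx with hx | ⟨iv, hiv, hm, rfl⟩
          · exact Or.inl hx
          · exact Or.inr ⟨iv, hiv, ⟨p, List.mem_cons_self, hm⟩, rfl⟩
        · rw [inner_snd, List.nil_append, List.mem_filter] at hiv
          exact Or.inr ⟨iv, hiv.1, ⟨q, List.mem_cons_of_mem _ hq, hm⟩, rfl⟩
      · rintro (hx | ⟨iv, hiv, ⟨q, hq, hm⟩, rfl⟩)
        · exact Or.inl (by rw [inner_fst_mem]; exact Or.inl hx)
        · rcases List.mem_cons.mp hq with rfl | hq'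
          · exact Or.inl (by rw [inner_fst_mem]; exact Or.inr ⟨iv, hiv, hm, rfl⟩)
          · by_cases hp : PySem.Str.isIn p iv.2 = true
            · exact Or.inl (by rw [inner_fst_mem]; exact Or.inr ⟨iv, hiv, hp, rfl⟩)
            · refine Or.inr ⟨iv, ?_, ⟨q, hq', hm⟩, rfl⟩
              rw [inner_snd, List.nil_append, List.mem_filter]
              exact ⟨hiv, by simpa using Bool.eq_false_iff.mpr hp⟩

theorem mem_mark (patterns : List String) (pairs : List (Int × String)) (x : Int) :
    x ∈ pvMark patterns pairs ↔
      ∃ iv ∈ pairs, (∃ p ∈ patterns, PySem.Str.isIn p iv.2 = true) ∧ x = iv.1 := by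
  unfold pvMark
  rw [mark_mem_aux]
  simp [PySem.Set.empty]

-- Bool-valued membership of an index of 'videos' in a pvMark set over a sublist of its
-- enumeration: true iff the index survives the sublist's filter and some pattern matches
theorem contains_mark (videos patterns : List String) (q : Int × String → Bool)
    (k : Nat) (hk : k < videos.length) :
    PySem.Set.contains
        (pvMark patterns ((PySem.List.enumerate videos 0).filter q)) (k : Int) =
      (q ((k : Int), videos[k]) &&
        patterns.any (fun p => PySem.Str.isIn p videos[k])) := by
  have h1 : PySem.Set.contains
        (pvMark patterns ((PySem.List.enumerate videos 0).filter q)) (k : Int) = true ↔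
      (q ((k : Int), videos[k]) = true ∧
        ∃ p ∈ patterns, PySem.Str.isIn p videos[k] = true) := by
    rw [show (PySem.Set.contains
          (pvMark patterns ((PySem.List.enumerate videos 0).filter q)) (k : Int) = true) ↔
        ((k : Int) ∈ pvMark patterns ((PySem.List.enumerate videos 0).filter q)) from by
      simp [PySem.Set.contains]]
    rw [mem_mark]
    constructor
    · rintro ⟨iv, hiv, hm, hkx⟩
      rw [List.mem_filter] at hiv
      rw [PySem.List.mem_enumerate_iff] at hiv
      obtain ⟨⟨j, hj, rfl⟩, hq⟩ := hiv
      have : j = k := by simpa using hkx.symm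
      subst this
      simp only [zero_add] at hq
      exact ⟨hq, hm⟩
    · rintro ⟨hq, p, hp, hm⟩
      refine ⟨((k : Int), videos[k]), ?_, ⟨p, hp, hm⟩, rfl⟩
      rw [List.mem_filter, PySem.List.mem_enumerate_iff]
      exact ⟨⟨k, hk, by simp⟩, hq⟩
  have h2 : (q ((k : Int), videos[k]) &&
        patterns.any (fun p => PySem.Str.isIn p videos[k])) = true ↔
      (q ((k : Int), videos[k]) = true ∧
        ∃ p ∈ patterns, PySem.Str.isIn p videos[k] = true) := by
    simp
  cases hb : (q ((k : Int), videos[k]) &&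
      patterns.any (fun p => PySem.Str.isIn p videos[k])) with
  | true => exact h1.mpr (h2.mp hb)
  | false =>
      by_contra hcontra
      have := h1.mp (by
        cases hc : PySem.Set.contains
            (pvMark patterns ((PySem.List.enumerate videos 0).filter q)) (k : Int) with
        | true => rfl
        | false => exact absurd hc hcontra)
      rw [← h2] at this
      rw [hb] at this
      exact Bool.false_ne_true this

-- the unfiltered enumeration is the filter by the constant-true predicate
theorem enumerate_eq_filter_true (videos : List String) :
    PySem.List.enumerate videos 0 =
      (PySem.List.enumerate videos 0).filter (fun _ => true) := by
  simp

-- the comprehension over enumerate equals a plain filter, for any index predicate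
-- that matches the per-element predicate at the shifted positions
theorem comp_eq_filter (pred : String → Bool) :
    ∀ (vs : List String) (s : Int) (f : Int → Bool),
      (∀ (k : Nat) (h : k < vs.length), f (s + k) = pred vs[k]) →
      ((PySem.List.enumerate vs s).filter (fun iv => f iv.1)).map (fun iv => iv.2) =
        vs.filter pred := by
  intro vs
  induction vs with
  | nil => intro s f _; simp
  | cons v tl ih =>
      intro s f hf
      rw [PySem.List.enumerate_cons]
      have h0 : f s = pred v := by simpa using hf 0 (by simp)
      have htl : ∀ (k : Nat) (h : k < tl.length), f ((s + 1) + k) = pred tl[k] := by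
        intro k h
        have := hf (k + 1) (by simpa using Nat.succ_lt_succ h)
        push_cast at this ⊢
        rw [show s + 1 + (k : Int) = s + ((k : Int) + 1) by ring]
        simpa using this
      cases hv : pred v with
      | true =>
          simp only [List.filter_cons, h0, hv, if_true, List.map_cons]
          rw [ih (s + 1) f htl]
      | false =>
          simp only [List.filter_cons, h0, hv, Bool.false_eq_true, if_false]
          rw [ih (s + 1) f htl]

-- B equals the same plain filter
theorem filterB_eq_filter (videos include_ exclude : List String) :
    filter_videos_alt videos include_ exclude =
      videos.filter (fun ii =>
        !(exclude.any (fun ex => PySem.Str.isIn ex ii)) &&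
          include_.any (fun inc => PySem.Str.isIn inc ii)) := by
  unfold filter_videos_alt
  have hexc : ∀ (k : Nat) (hk : k < videos.length),
      PySem.Set.contains (pvMark exclude (PySem.List.enumerate videos 0)) (k : Int) =
        exclude.any (fun ex => PySem.Str.isIn ex videos[k]) := by
    intro k hk
    conv_lhs => rw [enumerate_eq_filter_true videos]
    rw [contains_mark videos exclude (fun _ => true) k hk, Bool.true_and]
  refine comp_eq_filter _ videos 0
    (fun i => PySem.Set.contains
      (pvMark include_
        ((PySem.List.enumerate videos 0).filter
          (fun iv => !(PySem.Set.contains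
            (pvMark exclude (PySem.List.enumerate videos 0)) iv.1)))) i) ?_
  intro k hk
  simp only [zero_add]
  rw [contains_mark videos include_ _ k hk]
  simp only [hexc k hk]

-- ===== VERDICT (by name: the statement is the Claim_ definition above) =====
theorem filter_videos_spec : Claim_equal_filter_videos := by
  intro videos include_ exclude _
  unfold Spec_filter_videos
  rw [filterA_eq_filter, filterB_eq_filter]
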